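-- pv_equiv track=rewrite | github.com/Shakikhanli/Statistics | Define Branching stratgey.py | define_branch_strategy_gitFlow
-- ===== SOURCE A (Python) =====
-- def define_branch_strategy_gitFlow(branch_list):
--     master = False
--     dev = False
--     if 'master' in branch_list or 'main' in branch_list:
--         master = True
--
--     for each_branch in branch_list:
--         if 'dev' in each_branch:
--             dev = True
--             break
--
--     if dev and master:
--         return True
--     else:
--         return False
-- ===== SOURCE B (Python) =====
-- def define_branch_strategy_gitFlow(branch_list):
--     master = False
--     dev = False
--     for branch in branch_list:
--         master = master or branch == 'master' or branch == 'main'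
--         dev = dev or ('dev' in branch)
--         if master and dev:
--             return True
--     return master and dev
-- ===== Notes on version B (the rewrite author's own statement) =====
-- stated objective: alternative
-- what changed: A's separate membership test over the whole list plus a dedicated dev-scan loop are replaced by one single pass maintaining two flags with an early return once both are set.
import Mathlib
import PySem

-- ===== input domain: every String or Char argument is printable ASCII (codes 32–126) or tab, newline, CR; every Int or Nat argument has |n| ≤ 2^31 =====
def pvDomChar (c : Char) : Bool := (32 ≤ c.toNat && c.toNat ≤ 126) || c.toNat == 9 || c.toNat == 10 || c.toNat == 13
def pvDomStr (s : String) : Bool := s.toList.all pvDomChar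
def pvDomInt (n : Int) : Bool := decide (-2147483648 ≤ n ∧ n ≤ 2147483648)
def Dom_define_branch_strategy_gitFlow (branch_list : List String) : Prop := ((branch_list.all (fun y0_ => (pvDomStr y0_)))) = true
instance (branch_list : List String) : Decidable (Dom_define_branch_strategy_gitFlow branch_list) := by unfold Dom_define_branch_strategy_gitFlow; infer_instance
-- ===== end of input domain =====

-- B fuses A's whole-list membership test and separate dev-scan loop into one single pass with two flags and an early return (objective: alternative; same cost).
-- ===== PORT A =====
-- loop "for each_branch in branch_list: if 'dev' in each_branch: dev = True; break"
def pvADevLoop : List String → Bool → Bool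
  | [], dev => dev
  | b :: rest, dev => if PySem.Str.isIn "dev" b then true else pvADevLoop rest dev

def define_branch_strategy_gitFlow (branch_list : List String) : Bool :=
  let master := false
  let dev := false
  let master := if branch_list.contains "master" || branch_list.contains "main" then true else master
  let dev := pvADevLoop branch_list dev
  if dev && master then true else false

-- ===== PORT B =====
-- single pass carrying the two flags, early return once both hold
def pvBLoop : List String → Bool → Bool → Bool
  | [], master, dev => master && dev
  | b :: rest, master, dev =>
    let master := master || b == "master" || b == "main"
    let dev := dev || PySem.Str.isIn "dev" b
    if master && dev then true else pvBLoop rest master dev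

def define_branch_strategy_gitFlow_alt (branch_list : List String) : Bool :=
  pvBLoop branch_list false false

-- ===== PRECONDITION & SPEC =====
def Spec_define_branch_strategy_gitFlow (branch_list : List String) (out : Bool) : Prop := out = define_branch_strategy_gitFlow_alt branch_list
instance (branch_list : List String) (out : Bool) : Decidable (Spec_define_branch_strategy_gitFlow branch_list out) := by unfold Spec_define_branch_strategy_gitFlow; infer_instance

-- ===== CLAIM (what is proved, stated in full; the proofs are below) =====
def Claim_equal_define_branch_strategy_gitFlow : Prop := ∀ (branch_list : List String), Dom_define_branch_strategy_gitFlow branch_list → Spec_define_branch_strategy_gitFlow branch_list (define_branch_strategy_gitFlow branch_list)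

-- ===== LEMMAS AND PROOFS =====

-- ===== VERDICT (by name: the statement is the Claim_ definition above) =====
lemma pvADevLoop_eq (bl : List String) (d : Bool) :
    pvADevLoop bl d = (d || bl.any (fun b => PySem.Str.isIn "dev" b)) := by
  induction bl generalizing d with
  | nil => simp [pvADevLoop]
  | cons b rest ih =>
    simp only [pvADevLoop, List.any_cons]
    cases h : PySem.Str.isIn "dev" b <;> simp [h, ih, Bool.or_left_comm]

lemma pvBLoop_eq (bl : List String) (m d : Bool) :
    pvBLoop bl m d = ((m || bl.any (fun b => b == "master" || b == "main")) &&
                      (d || bl.any (fun b => PySem.Str.isIn "dev" b))) := by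
  induction bl generalizing m d with
  | nil => simp [pvBLoop]
  | cons b rest ih =>
    simp only [pvBLoop, List.any_cons]
    cases m <;> cases d <;> cases hb1 : (b == "master") <;> cases hb2 : (b == "main") <;>
      cases hb3 : PySem.Str.isIn "dev" b <;> simp [hb1, hb2, hb3, ih]

lemma pvContains_any (bl : List String) (s : String) :
    bl.contains s = bl.any (fun b => b == s) := by
  simp [List.any_beq']

lemma pvAnyOr (bl : List String) :
    bl.any (fun b => b == "master" || b == "main")
      = (bl.any (fun b => b == "master") || bl.any (fun b => b == "main")) := by
  induction bl with
  | nil => simp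
  | cons b rest ih =>
    simp only [List.any_cons, ih]
    cases (b == "master") <;> cases (b == "main") <;> simp

theorem define_branch_strategy_gitFlow_spec : Claim_equal_define_branch_strategy_gitFlow := by
  intro bl _
  unfold Spec_define_branch_strategy_gitFlow define_branch_strategy_gitFlow define_branch_strategy_gitFlow_alt
  simp only [pvADevLoop_eq, pvBLoop_eq, pvContains_any, Bool.false_or]
  rw [pvAnyOr]
  cases h1 : bl.any (fun b => b == "master") <;>
    cases h2 : bl.any (fun b => b == "main") <;>
    cases h3 : bl.any (fun b => PySem.Str.isIn "dev" b) <;> simp [h1, h2, h3]
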